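-- pv_equiv track=rewrite | github.com/AlexanderLolo/Programming_course | src/8problems_2/problemset_4_1.py | artificial_muscle_fibers
-- ===== SOURCE A (Python) =====
-- def artificial_muscle_fibers(arr: list) -> int:
--
--     num = 0
--     for i in range(1, 32000):
--         count = 0
--         for element in arr:
--             if i == element:
--                 count += 1
--             if count > 1:
--                 num += 1
--                 break
--
--     return num
-- ===== SOURCE B (Python) =====
-- def artificial_muscle_fibers(arr: list) -> int:
--     freq = {}
--     for x in arr:
--         freq[x] = freq.get(x, 0) + 1
--     num = 0
--     for k, v in freq.items():
--         if 1 <= k <= 31999 and v >= 2: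
--             num += 1
--     return num
-- ===== Notes on version B (the rewrite author's own statement) =====
-- stated objective: faster
-- what changed: Replaced the scan of every candidate value 1..31999 (each with an inner pass over arr) by one pass building a frequency dict and a pass over its keys counting those inside the candidate range with frequency at least 2.
import Mathlib
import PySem

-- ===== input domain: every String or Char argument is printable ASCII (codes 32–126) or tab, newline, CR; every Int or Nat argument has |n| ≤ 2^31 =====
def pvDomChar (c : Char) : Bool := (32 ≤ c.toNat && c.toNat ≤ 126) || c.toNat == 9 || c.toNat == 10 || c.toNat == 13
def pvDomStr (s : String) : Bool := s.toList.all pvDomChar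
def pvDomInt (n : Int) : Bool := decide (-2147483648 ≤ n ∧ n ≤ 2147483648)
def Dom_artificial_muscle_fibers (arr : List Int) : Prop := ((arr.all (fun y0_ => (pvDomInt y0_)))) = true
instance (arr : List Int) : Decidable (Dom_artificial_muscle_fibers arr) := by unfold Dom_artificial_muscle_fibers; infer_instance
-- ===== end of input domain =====

-- B replaces the scan of every candidate 1..31999 by one frequency-dict pass (objective: faster).
-- ===== PORT A =====
-- inner 'for element in arr' loop: count matches of i, on count > 1 add 1 to num and break
def amfInner (i : Int) : List Int → Int → Bool
  | [], _ => false
  | e :: rest, count =>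
    let count := if i == e then count + 1 else count
    if count > 1 then true else amfInner i rest count

def artificial_muscle_fibers (arr : List Int) : Int :=
  (PySem.List.pyRange 1 32000 1).foldl
    (fun num i => if amfInner i arr 0 then num + 1 else num) 0

-- ===== PORT B =====
def artificial_muscle_fibers_alt (arr : List Int) : Int :=
  ((arr.foldl (fun d x => d.insert x (d.getD x 0 + 1)) (PySem.Dict.empty : PySem.Dict Int Int)).items).foldl
    (fun num p => if 1 ≤ p.1 ∧ p.1 ≤ 31999 ∧ 2 ≤ p.2 then num + 1 else num) 0

-- ===== PRECONDITION & SPEC =====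
def Spec_artificial_muscle_fibers (arr : List Int) (out : Int) : Prop := out = artificial_muscle_fibers_alt arr
instance (arr : List Int) (out : Int) : Decidable (Spec_artificial_muscle_fibers arr out) := by unfold Spec_artificial_muscle_fibers; infer_instance

-- ===== CLAIM (what is proved, stated in full; the proofs are below) =====
def Claim_equal_artificial_muscle_fibers : Prop := ∀ (arr : List Int), Dom_artificial_muscle_fibers arr → Spec_artificial_muscle_fibers arr (artificial_muscle_fibers arr)

-- ===== LEMMAS AND PROOFS =====

-- A's inner loop returns true iff the running count reaches 2
theorem amfInner_eq (i : Int) (l : List Int) (c : Int) (hc : c ≤ 1) :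
    amfInner i l c = decide (2 ≤ c + (l.count i : Int)) := by
  induction l generalizing c with
  | nil => simp [amfInner]; omega
  | cons e rest ih =>
    by_cases h : i = e
    · subst h
      by_cases h2 : c + 1 > 1
      · simp only [amfInner, beq_self_eq_true, if_true, if_pos h2, List.count_cons]
        symm
        simp only [decide_eq_true_eq]
        push_cast
        omega
      · simp only [amfInner, beq_self_eq_true, if_true, if_neg h2, List.count_cons]
        rw [ih (c + 1) (by omega)]
        congr 1
        push_cast
        ring_nf
    · have hb : (i == e) = false := by simp [h]
      have hb2 : (e == i) = false := by simp [Ne.symm h]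
      simp only [amfInner, hb, Bool.false_eq_true, if_false, List.count_cons, hb2]
      rw [if_neg (by omega), ih c hc]
      simp

theorem A_eq_countP (arr : List Int) :
    artificial_muscle_fibers arr
      = ((PySem.List.pyRange 1 32000 1).countP
          (fun i => decide (2 ≤ (arr.count i : Int))) : Int) := by
  unfold artificial_muscle_fibers
  have h := PySem.List.foldl_congr_mem (PySem.List.pyRange 1 32000 1)
    (fun num i => if amfInner i arr 0 then num + 1 else num)
    (fun num i => if 2 ≤ (arr.count i : Int) then num + 1 else num) (0 : Int)
    (by intro acc x _; simp [amfInner_eq x arr 0 (by omega)])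
  rw [h, PySem.List.foldl_ite_add_one]
  exact zero_add _

theorem B_eq_countP (arr : List Int) :
    artificial_muscle_fibers_alt arr
      = ((PySem.Set.ofList arr).countP
          (fun k => decide (1 ≤ k ∧ k ≤ 31999 ∧ 2 ≤ (arr.count k : Int))) : Int) := by
  unfold artificial_muscle_fibers_alt
  rw [PySem.Dict.foldl_insert_getD_add_one_eq_counter, PySem.Dict.items_counter,
    PySem.List.foldl_ite_add_one, List.countP_map, zero_add]
  congr 1


-- ===== VERDICT (by name: the statement is the Claim_ definition above) =====
theorem artificial_muscle_fibers_spec : Claim_equal_artificial_muscle_fibers := by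
  intro arr _
  unfold Spec_artificial_muscle_fibers
  rw [A_eq_countP, B_eq_countP]
  have hperm : ((PySem.List.pyRange 1 32000 1).filter
        (fun i => decide (2 ≤ (arr.count i : Int)))).Perm
      ((PySem.Set.ofList arr).filter
        (fun k => decide (1 ≤ k ∧ k ≤ 31999 ∧ 2 ≤ (arr.count k : Int)))) := by
    apply (List.perm_ext_iff_of_nodup
      ((PySem.List.nodup_pyRange_one 1 32000).filter _)
      ((PySem.Set.nodup_ofList arr).filter _)).2
    intro x
    simp only [List.mem_filter, PySem.List.mem_pyRange_one, PySem.Set.mem_ofList,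
      decide_eq_true_eq]
    constructor
    · rintro ⟨⟨h1, h2⟩, h3⟩
      have : 0 < arr.count x := by omega
      exact ⟨List.count_pos_iff.1 this, h1, by omega, h3⟩
    · rintro ⟨_, h1, h2, h3⟩
      exact ⟨⟨h1, by omega⟩, h3⟩
  rw [List.countP_eq_length_filter, List.countP_eq_length_filter, hperm.length_eq]
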